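-- pv_equiv track=rewrite | github.com/rajanbit/Bioinfo_py_Scripts | multi_fasta_deconcatenator.py | parsing_data
-- ===== SOURCE A (Python) =====
-- def parsing_data(acc_id, data):
-- 	head_index = None
-- 	seq = ""
-- 	header = ""
-- 	for i in range(0, len(data)):
-- 		data_f = data[i]
-- 		if acc_id in data_f:
-- 			header += data_f
-- 			head_index = i
-- 			break
-- 	if head_index != None:
-- 		for i in range(head_index+1, len(data)):
-- 			data_s = data[i]
-- 			if data_s[0] != ">":
-- 				seq += data_s
-- 			else:
-- 				break
-- 	return(header+seq)
-- ===== SOURCE B (Python) =====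
-- def parsing_data(acc_id, data):
--     SEARCH, COLLECT, DONE = 0, 1, 2
--     state = SEARCH
--     parts = []
--     for line in data:
--         if state == SEARCH:
--             if acc_id in line:
--                 parts.append(line)
--                 state = COLLECT
--         elif state == COLLECT:
--             if line.startswith(">"):
--                 state = DONE
--             else:
--                 parts.append(line)
--     return "".join(parts)
-- ===== Notes on version B (the rewrite author's own statement) =====
-- stated objective: alternative
-- what changed: Replaces A's two sequential index loops (break, string += accumulators, line[0] indexing) with a single pass over the lines driven by a three-state machine (searching/collecting/done) that collects parts in a list and joins them once at the end.
import Mathlib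
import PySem

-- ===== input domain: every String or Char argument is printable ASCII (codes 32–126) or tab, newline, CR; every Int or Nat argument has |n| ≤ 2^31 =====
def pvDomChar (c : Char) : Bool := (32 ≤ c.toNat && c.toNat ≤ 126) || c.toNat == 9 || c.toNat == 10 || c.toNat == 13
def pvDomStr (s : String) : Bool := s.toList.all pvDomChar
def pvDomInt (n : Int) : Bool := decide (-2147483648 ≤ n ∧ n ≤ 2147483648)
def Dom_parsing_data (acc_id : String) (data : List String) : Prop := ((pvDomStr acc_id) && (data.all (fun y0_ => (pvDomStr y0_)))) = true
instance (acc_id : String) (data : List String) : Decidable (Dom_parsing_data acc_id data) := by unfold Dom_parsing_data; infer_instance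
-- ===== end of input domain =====

-- B replaces A's two sequential index loops (break, string += accumulators, line[0]
-- indexing) by a single pass over the lines driven by a three-state machine
-- (searching/collecting/done) that collects parts in a list joined once at the end;
-- same cost, different decomposition.

-- ===== PORT A =====
-- first loop: i from 0 while i < len(data); break on 'acc_id in data[i]'
def pdFindA (acc_id : String) (data : List String) (i : Nat) : Option Nat :=
  if h : i < data.length then
    if PySem.Str.isIn acc_id data[i] then some i else pdFindA acc_id data (i + 1)
  else none
termination_by data.length - i

-- second loop: for i in range(head_index+1, len(data)); data_s[0] via pyGet? (none = IndexError, excluded by Pre_)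
def pdSeqA (data : List String) (i : Nat) (seq : List Char) : List Char :=
  if h : i < data.length then
    match PySem.List.pyGet? (data[i].toList) 0 with
    | some c => if c ≠ '>' then pdSeqA data (i + 1) (seq ++ data[i].toList) else seq
    | none => seq   -- Python raises IndexError here; these inputs are outside Pre_
  else seq
termination_by data.length - i

def parsing_data (acc_id : String) (data : List String) : String :=
  match pdFindA acc_id data 0 with
  | none => String.ofList []
  | some i => String.ofList ((data.getD i "").toList ++ pdSeqA data (i + 1) [])

-- ===== PORT B =====
-- one transition of the state machine (state 0 = searching, 1 = collecting, 2 = done)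
def pdStepB (acc_id : String) (acc : Nat × List (List Char)) (line : String) : Nat × List (List Char) :=
  match acc with
  | (0, parts) => if PySem.Str.isIn acc_id line then (1, parts ++ [line.toList]) else (0, parts)
  | (1, parts) => if PySem.Str.startswith line ">" then (2, parts) else (1, parts ++ [line.toList])
  | (s, parts) => (s, parts)

def parsing_data_alt (acc_id : String) (data : List String) : String :=
  String.ofList (PySem.Chars.join [] (data.foldl (pdStepB acc_id) (0, [])).2)

-- ===== PRECONDITION & SPEC =====
-- Pre_ excludes exactly the inputs on which A raises IndexError: an empty line occurring
-- in the record body after the first acc_id-matching line and before the next '>' line.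
def Pre_parsing_data (acc_id : String) (data : List String) : Prop :=
  ((data.findIdx? (fun s => PySem.Str.isIn acc_id s)).all
    (fun i => ((data.drop (i + 1)).takeWhile (fun s => !PySem.Str.startswith s ">")).all
      (fun s => !(s == "")))) = true
instance (acc_id : String) (data : List String) : Decidable (Pre_parsing_data acc_id data) := by
  unfold Pre_parsing_data; infer_instance

def pvWitness_parsing_data : String × List String := (">X", [">X header", "abc", "def", ">Y"])

def Spec_parsing_data (acc_id : String) (data : List String) (out : String) : Prop :=
  out = parsing_data_alt acc_id data
instance (acc_id : String) (data : List String) (out : String) : Decidable (Spec_parsing_data acc_id data out) := by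
  unfold Spec_parsing_data; infer_instance

-- ===== CLAIM (what is proved, stated in full; the proofs are below) =====
def Claim_equal_parsing_data : Prop := ∀ (acc_id : String) (data : List String), Dom_parsing_data acc_id data → Pre_parsing_data acc_id data → Spec_parsing_data acc_id data (parsing_data acc_id data)

-- ===== LEMMAS AND PROOFS =====

theorem pdFindA_eq (acc_id : String) (data : List String) :
    ∀ i : Nat, pdFindA acc_id data i =
      ((data.drop i).findIdx? (fun s => PySem.Str.isIn acc_id s)).map (· + i) := by
  intro i
  fun_induction pdFindA acc_id data i with
  | case1 i h hp =>
      rw [List.drop_eq_getElem_cons h, List.findIdx?_cons, if_pos hp]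
      simp
  | case2 i h hp ih =>
      rw [List.drop_eq_getElem_cons h, List.findIdx?_cons, if_neg hp, ih, Option.map_map]
      congr 1; funext x; simp; omega
  | case3 i h =>
      rw [List.drop_of_length_le (Nat.le_of_not_lt h)]
      simp

def pdSeqL (rest : List String) (seq : List Char) : List Char :=
  match rest with
  | [] => seq
  | s :: t =>
    match PySem.List.pyGet? s.toList 0 with
    | some c => if c ≠ '>' then pdSeqL t (seq ++ s.toList) else seq
    | none => seq

theorem pdSeqA_eq_pdSeqL (data : List String) :
    ∀ i seq, pdSeqA data i seq = pdSeqL (data.drop i) seq := by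
  intro i seq
  fun_induction pdSeqA data i seq with
  | case1 i seq h c hc hne ih =>
      rw [List.drop_eq_getElem_cons h, pdSeqL, hc]; dsimp only; rw [if_pos hne, ih]
  | case2 i seq h c hc hne =>
      rw [List.drop_eq_getElem_cons h, pdSeqL, hc]; dsimp only; rw [if_neg hne]
  | case3 i seq h hc =>
      rw [List.drop_eq_getElem_cons h, pdSeqL, hc]
  | case4 i seq h =>
      rw [List.drop_of_length_le (Nat.le_of_not_lt h), pdSeqL]

theorem joinNil (L : List (List Char)) : PySem.Chars.join [] L = L.flatten := by
  induction L with
  | nil => rw [PySem.Chars.join_nil, List.flatten_nil]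
  | cons a t ih =>
      cases t with
      | nil => rw [PySem.Chars.join_singleton]; simp
      | cons b l => rw [PySem.Chars.join_cons_cons, ih]; simp

theorem pdSeqL_eq_flatten (rest : List String) (seq : List Char)
    (h : ∀ s ∈ rest.takeWhile (fun s => !PySem.Str.startswith s ">"), s ≠ "") :
    pdSeqL rest seq = seq ++
      ((rest.takeWhile (fun s => !PySem.Str.startswith s ">")).map String.toList).flatten := by
  induction rest generalizing seq with
  | nil => simp [pdSeqL]
  | cons s t ih =>
      rw [pdSeqL]
      rcases hg : PySem.List.pyGet? s.toList 0 with _ | c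
      · -- empty line: Python raises; excluded by h
        have hsL : s.toList = [] := by
          cases hsL : s.toList with
          | nil => rfl
          | cons a l => rw [hsL] at hg; simp at hg
        have hs : s = "" := by
          have := congrArg String.ofList hsL; simpa using this
        have hsw : PySem.Str.startswith s ">" = false := by
          rw [Bool.eq_false_iff]
          intro hT
          rw [PySem.Str.startswith_eq, PySem.Chars.startswith_iff] at hT
          rw [hsL] at hT
          simp at hT
        exfalso
        apply h s _ hs
        rw [List.takeWhile_cons, hsw]
        simp
      · rcases hsL : s.toList with _ | ⟨a, l⟩
        · rw [hsL] at hg; simp [PySem.List.pyGet?] at hg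
        have ha : a = c := by
          rw [hsL] at hg; simpa [PySem.List.pyGet?_zero_cons] using hg
        subst ha
        by_cases hne : a ≠ '>'
        · dsimp only; rw [if_pos hne]
          have hsw : PySem.Str.startswith s ">" = false := by
            rw [Bool.eq_false_iff]
            intro hT
            rw [PySem.Str.startswith_eq, PySem.Chars.startswith_iff, hsL] at hT
            have := (List.cons_prefix_cons.mp hT).1
            exact hne this.symm
          rw [List.takeWhile_cons, hsw] at h ⊢
          simp only [Bool.not_false, if_true] at h ⊢
          rw [ih _ (fun x hx => h x (List.mem_cons_of_mem _ hx))]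
          simp [List.append_assoc, hsL]
        · dsimp only; rw [if_neg hne]
          push Not at hne
          have hsw : PySem.Str.startswith s ">" = true := by
            rw [PySem.Str.startswith_eq, PySem.Chars.startswith_iff, hsL,
              show (">" : String).toList = ['>'] from rfl]
            exact List.cons_prefix_cons.mpr ⟨hne.symm, List.nil_prefix⟩
          rw [List.takeWhile_cons, hsw]
          simp

-- B's state machine, state 2: the rest of the input is ignored
theorem foldlB_done (acc_id : String) :
    ∀ (xs : List String) (parts : List (List Char)),
      xs.foldl (pdStepB acc_id) (2, parts) = (2, parts) := by
  intro xs
  induction xs with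
  | nil => intro parts; rfl
  | cons x t ih => intro parts; rw [List.foldl_cons]; exact ih parts

-- B's state machine, state 1: collects exactly the lines up to the next '>' line
theorem foldlB_collect (acc_id : String) :
    ∀ (xs : List String) (parts : List (List Char)),
      (xs.foldl (pdStepB acc_id) (1, parts)).2 =
        parts ++ (xs.takeWhile (fun s => !PySem.Str.startswith s ">")).map String.toList := by
  intro xs
  induction xs with
  | nil => intro parts; simp
  | cons x t ih =>
      intro parts
      rw [List.foldl_cons, List.takeWhile_cons]
      show (t.foldl (pdStepB acc_id)
        (if PySem.Str.startswith x ">" then (2, parts) else (1, parts ++ [x.toList]))).2 = _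
      by_cases hx : PySem.Str.startswith x ">"
      · rw [if_pos hx, hx, foldlB_done]; simp
      · rw [if_neg hx, ih, Bool.eq_false_iff.mpr hx]; simp
 
-- B's state machine, state 0: the result is the first matching line plus its record body
theorem foldlB_search (acc_id : String) :
    ∀ (xs : List String) (parts : List (List Char)),
      (xs.foldl (pdStepB acc_id) (0, parts)).2 =
        match xs.findIdx? (fun s => PySem.Str.isIn acc_id s) with
        | none => parts
        | some i => parts ++ [(xs.getD i "").toList] ++
            ((xs.drop (i + 1)).takeWhile (fun s => !PySem.Str.startswith s ">")).map String.toList := by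
  intro xs
  induction xs with
  | nil => intro parts; simp
  | cons x t ih =>
      intro parts
      rw [List.foldl_cons, List.findIdx?_cons]
      show (t.foldl (pdStepB acc_id)
        (if PySem.Str.isIn acc_id x then (1, parts ++ [x.toList]) else (0, parts))).2 = _
      by_cases hx : PySem.Str.isIn acc_id x
      · rw [if_pos hx, hx, foldlB_collect]
        simp
      · rw [if_neg hx, ih, Bool.eq_false_iff.mpr hx]
        rcases t.findIdx? (fun s => PySem.Str.isIn acc_id s) with _ | i
        · rfl
        · simp

-- ===== VERDICT (by name: the statement is the Claim_ definition above) =====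
theorem parsing_data_spec : Claim_equal_parsing_data := by
  intro acc_id data _ hpre
  unfold Spec_parsing_data parsing_data parsing_data_alt
  rw [pdFindA_eq, List.drop_zero, foldlB_search, joinNil]
  rcases hF : data.findIdx? (fun s => PySem.Str.isIn acc_id s) with _ | i
  · rfl
  · simp only [Option.map_some, Nat.add_zero]
    have hall : ∀ s ∈ (data.drop (i + 1)).takeWhile
        (fun s => !PySem.Str.startswith s ">"), s ≠ "" := by
      unfold Pre_parsing_data at hpre
      rw [hF] at hpre
      simp only [Option.all_some, List.all_eq_true] at hpre
      intro s hs
      have := hpre s hs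
      simpa using this
    rw [pdSeqA_eq_pdSeqL, pdSeqL_eq_flatten _ _ hall]
    simp
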